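-- pv_equiv track=rewrite | github.com/rodinopps/Codewars | Python/7 Kyu/small-enough?-beginner.py | small_enough
-- ===== SOURCE A (Python) =====
-- def small_enough(array, limit):
--     list = []
--     for i in array:
--         if i <= limit:
--             list.append(True)
--         else:
--             list.append(False)
--     if False in list:
--         return False
--     else:
--         return True
-- ===== SOURCE B (Python) =====
-- def small_enough(array, limit):
--     return not array or max(array) <= limit
-- ===== Notes on version B (the rewrite author's own statement) =====
-- stated objective: simpler
-- what changed: Instead of building a boolean list per element and testing False membership, B reduces the array to its maximum once and compares it to limit (with an empty guard).
import Mathlib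
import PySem

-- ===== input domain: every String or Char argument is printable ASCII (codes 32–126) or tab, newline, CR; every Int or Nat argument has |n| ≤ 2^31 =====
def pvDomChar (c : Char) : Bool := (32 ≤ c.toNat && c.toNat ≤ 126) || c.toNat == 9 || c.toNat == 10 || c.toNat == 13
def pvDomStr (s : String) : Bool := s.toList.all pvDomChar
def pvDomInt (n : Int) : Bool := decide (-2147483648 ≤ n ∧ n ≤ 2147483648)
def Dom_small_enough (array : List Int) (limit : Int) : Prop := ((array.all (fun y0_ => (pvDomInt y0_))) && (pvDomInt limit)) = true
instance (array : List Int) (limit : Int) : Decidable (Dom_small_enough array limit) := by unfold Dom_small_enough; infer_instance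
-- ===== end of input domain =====

-- B replaces the per-element boolean list + False-membership test by a single max reduction; objective: simpler.

-- ===== PORT A =====
-- A builds a list of booleans (one per element), then returns False iff False occurs in it.
def small_enough (array : List Int) (limit : Int) : Bool :=
  let lst := array.foldl (fun acc i => acc ++ [if i ≤ limit then true else false]) []
  if false ∈ lst then false else true

-- ===== PORT B =====
-- B: not array or max(array) <= limit  (max with no key = running-max foldl)
def small_enough_alt (array : List Int) (limit : Int) : Bool :=
  match array with
  | [] => true
  | x :: t => decide (t.foldl max x ≤ limit)

-- ===== PRECONDITION & SPEC =====
def Spec_small_enough (array : List Int) (limit : Int) (out : Bool) : Prop := out = small_enough_alt array limit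
instance (array : List Int) (limit : Int) (out : Bool) : Decidable (Spec_small_enough array limit out) := by unfold Spec_small_enough; infer_instance

-- ===== CLAIM (what is proved, stated in full; the proofs are below) =====
def Claim_equal_small_enough : Prop := ∀ (array : List Int) (limit : Int), Dom_small_enough array limit → Spec_small_enough array limit (small_enough array limit)

-- ===== LEMMAS AND PROOFS =====
-- A's boolean list is just a map; False ∈ map ↔ some element exceeds limit.
lemma small_enough_foldl_eq_map (array : List Int) (limit : Int) (acc : List Bool) :
    array.foldl (fun acc i => acc ++ [if i ≤ limit then true else false]) acc
      = acc ++ array.map (fun i => if i ≤ limit then true else false) := by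
  induction array generalizing acc with
  | nil => simp
  | cons x t ih => simp only [List.foldl_cons, List.map_cons]; rw [ih]; simp

lemma small_enough_eq_all (array : List Int) (limit : Int) :
    small_enough array limit = array.all (fun i => decide (i ≤ limit)) := by
  unfold small_enough
  rw [small_enough_foldl_eq_map]
  simp only [List.nil_append]
  by_cases h : false ∈ array.map (fun i => if i ≤ limit then true else false)
  · simp only [h, if_true]
    simp only [List.mem_map] at h
    obtain ⟨i, hi, hf⟩ := h
    have hgt : ¬ i ≤ limit := by by_contra hc; simp [hc] at hf
    symm
    simp only [List.all_eq_false]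
    exact ⟨i, hi, by simp [hgt]⟩
  · simp only [h, if_false]
    symm
    simp only [List.all_eq_true]
    intro i hi
    simp only [List.mem_map, not_exists] at h
    have := h i
    by_contra hc
    simp at hc
    exact this ⟨hi, by simp; omega⟩

lemma small_enough_alt_eq_all (array : List Int) (limit : Int) :
    small_enough_alt array limit = array.all (fun i => decide (i ≤ limit)) := by
  cases array with
  | nil => simp [small_enough_alt]
  | cons x t =>
    simp only [small_enough_alt, List.all_cons]
    rcases PySem.List.le_foldl_max t x with ⟨hx, hmem⟩
    by_cases h : t.foldl max x ≤ limit
    · have hx' : x ≤ limit := le_trans hx h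
      simp only [h, decide_true, hx', Bool.true_and]
      symm
      simp only [List.all_eq_true, decide_eq_true_eq]
      exact fun i hi => le_trans (hmem i hi) h
    · simp only [h, decide_false]
      symm
      simp only [Bool.and_eq_false_iff, decide_eq_false_iff_not, List.all_eq_false]
      rcases PySem.List.foldl_max_mem t x with heq | hin
      · left; omega
      · right; exact ⟨t.foldl max x, hin, by simp; omega⟩

-- ===== VERDICT (by name: the statement is the Claim_ definition above) =====
theorem small_enough_spec : Claim_equal_small_enough := by
  intro array limit _
  unfold Spec_small_enough
  rw [small_enough_eq_all, small_enough_alt_eq_all]
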